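-- pv_equiv track=rewrite | github.com/BUAA-SUT/FAILTIM | code/publicFun.py | modifycase
-- ===== SOURCE A (Python) =====
-- def modifycase(source_case_set, MG):
--     index = []
--     for i in range(len(MG)):
--         k = 0
--         k_v = 0
--         for m in range(len(MG[i])):
--             if 1 in MG[i][m]:
--                 k += 1
--             if 0 in MG[i][m]:
--                 k_v += 1
--             if k != 0 and k_v != 0:  # 既有1又有0
--                 break
--             else:
--                 k = 0
--                 k_v = 0
--         if k == 0 or k_v == 0:  # 全0或者全1
--             index.append(i)
--     source_case_set = [source_case_set[i] for i in range(len(source_case_set)) if (i not in index)]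
--     return source_case_set
-- ===== SOURCE B (Python) =====
-- def modifycase(source_case_set, MG):
--     # Walk source and MG in parallel (no index arithmetic, no exclusion list):
--     # keep x when its paired row has a sublist containing both 1 and 0, or when
--     # MG is exhausted.
--     rows = iter(MG)
--     kept = []
--     for x in source_case_set:
--         row = next(rows, None)
--         if row is None:
--             kept.append(x)
--         else:
--             for s in row:
--                 if 1 in s and 0 in s:
--                     kept.append(x)
--                     break
--     return kept
-- ===== Notes on version B (the rewrite author's own statement) =====
-- stated objective: faster
-- what changed: Replaces A's staged index computation (counter loop with reset/break over every MG row, then a filter of source by linear 'i not in index' scans) with a single parallel walk of source and an MG iterator using an explicit accumulator: each element is paired with its row and kept on finding a sublist with both 1 and 0, no index list or index arithmetic at all.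
import Mathlib
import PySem

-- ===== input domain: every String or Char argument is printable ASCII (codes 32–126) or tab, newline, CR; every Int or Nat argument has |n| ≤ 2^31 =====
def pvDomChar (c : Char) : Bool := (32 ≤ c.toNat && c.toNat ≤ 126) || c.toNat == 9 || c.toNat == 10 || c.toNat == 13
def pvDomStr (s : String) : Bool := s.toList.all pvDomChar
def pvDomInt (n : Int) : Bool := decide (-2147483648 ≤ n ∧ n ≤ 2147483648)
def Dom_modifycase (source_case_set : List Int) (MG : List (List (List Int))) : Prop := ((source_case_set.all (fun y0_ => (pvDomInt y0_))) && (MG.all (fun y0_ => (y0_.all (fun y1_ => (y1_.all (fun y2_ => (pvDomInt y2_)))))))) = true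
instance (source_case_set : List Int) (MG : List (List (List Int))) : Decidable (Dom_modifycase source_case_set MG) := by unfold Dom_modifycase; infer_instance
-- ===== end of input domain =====

-- B replaces A's staged index computation (counter loop over every MG row, then a filter of
-- source by linear 'i not in index' scans) with one parallel walk of source and MG carrying
-- an explicit accumulator; no index list or index arithmetic remains.

-- ===== PORT A =====
-- inner loop over the sublists of MG[i], carrying k and k_v with reset/break
def pvInner : Int → Int → List (List Int) → Int × Int
  | k, kv, [] => (k, kv)
  | k, kv, s :: rest =>
    let k' := if (1 : Int) ∈ s then k + 1 else k
    let kv' := if (0 : Int) ∈ s then kv + 1 else kv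
    if k' ≠ 0 ∧ kv' ≠ 0 then (k', kv') else pvInner 0 0 rest

def modifycase (source_case_set : List Int) (MG : List (List (List Int))) : List Int :=
  let index : List Int := (PySem.List.pyRange 0 MG.length 1).filter (fun i =>
    let p := pvInner 0 0 (PySem.List.pyGetD MG i [])
    p.1 == 0 || p.2 == 0)
  ((PySem.List.pyRange 0 source_case_set.length 1).filter (fun i => !(index.contains i))).map
    (fun i => PySem.List.pyGetD source_case_set i 0)

-- ===== PORT B =====
-- inner 'for s in row: if 1 in s and 0 in s: append; break'
def pvRowKeeps : List (List Int) → Bool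
  | [] => false
  | s :: rest => if s.contains 1 && s.contains 0 then true else pvRowKeeps rest

-- parallel walk of source and the MG iterator, with the kept-accumulator built structurally
def pvWalk : List Int → List (List (List Int)) → List Int
  | [], _ => []
  | x :: xs, [] => x :: pvWalk xs []
  | x :: xs, row :: rows => if pvRowKeeps row then x :: pvWalk xs rows else pvWalk xs rows

def modifycase_alt (source_case_set : List Int) (MG : List (List (List Int))) : List Int :=
  pvWalk source_case_set MG

-- ===== PRECONDITION & SPEC =====
def Spec_modifycase (source_case_set : List Int) (MG : List (List (List Int))) (out : List Int) : Prop := out = modifycase_alt source_case_set MG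
instance (source_case_set : List Int) (MG : List (List (List Int))) (out : List Int) : Decidable (Spec_modifycase source_case_set MG out) := by unfold Spec_modifycase; infer_instance

-- ===== CLAIM (what is proved, stated in full; the proofs are below) =====
def Claim_equal_modifycase : Prop := ∀ (source_case_set : List Int) (MG : List (List (List Int))), Dom_modifycase source_case_set MG → Spec_modifycase source_case_set MG (modifycase source_case_set MG)

-- ===== LEMMAS AND PROOFS =====

-- proof-only intermediate form: index-based filter of source by a per-row predicate
def pvMixed (row : List (List Int)) : Bool :=
  row.any (fun s => s.contains 1 && s.contains 0)

def pvFilt (source_case_set : List Int) (MG : List (List (List Int))) : List Int :=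
  (PySem.List.enumerate source_case_set).filterMap (fun p =>
    if decide ((MG.length : Int) ≤ p.1) || pvMixed (PySem.List.pyGetD MG p.1 []) then some p.2
    else none)

-- A's reset/break counter loop decides exactly "no sublist contains both 1 and 0"
theorem pvInner_spec (row : List (List Int)) :
    (((pvInner 0 0 row).1 == 0) || ((pvInner 0 0 row).2 == 0)) = !pvMixed row := by
  induction row with
  | nil => rfl
  | cons s rest ih =>
    by_cases h1 : (1 : Int) ∈ s <;> by_cases h0 : (0 : Int) ∈ s <;>
      simp [pvInner, pvMixed, h1, h0] <;>
      simpa [pvMixed] using ih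

theorem pvRowKeeps_eq_pvMixed (row : List (List Int)) : pvRowKeeps row = pvMixed row := by
  induction row with
  | nil => rfl
  | cons s rest ih => simp [pvRowKeeps, pvMixed, ih]

theorem filter_map_eq_filterMap {α β : Type} (l : List α) (p : α → Bool) (f : α → β) :
    (l.filter p).map f = l.filterMap (fun a => if p a then some (f a) else none) := by
  induction l with
  | nil => rfl
  | cons a l ih => by_cases h : p a <;> simp [h, ih]

theorem modifycase_eq_pvFilt (source_case_set : List Int) (MG : List (List (List Int))) :
    modifycase source_case_set MG = pvFilt source_case_set MG := by
  unfold modifycase pvFilt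
  rw [PySem.List.enumerate_eq_map_pyRange (d := 0), List.filterMap_map,
    filter_map_eq_filterMap]
  apply List.filterMap_congr
  intro i hi
  have h0i : 0 ≤ i ∧ i < (source_case_set.length : Int) :=
    (PySem.List.mem_pyRange_one).1 hi
  have hcontains : ((PySem.List.pyRange 0 (MG.length : Int) 1).filter (fun j =>
      let p := pvInner 0 0 (PySem.List.pyGetD MG j [])
      p.1 == 0 || p.2 == 0)).contains i =
      (decide (i < (MG.length : Int)) && !pvMixed (PySem.List.pyGetD MG i [])) := by
    rw [Bool.eq_iff_iff]
    simp [pvInner_spec, h0i.1]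
  have hb : (!(decide (i < (MG.length : Int)) && !pvMixed (PySem.List.pyGetD MG i []))) =
      (decide ((MG.length : Int) ≤ i) || pvMixed (PySem.List.pyGetD MG i [])) := by
    by_cases hlt : i < (MG.length : Int)
    · simp [hlt, not_le.mpr hlt]
    · have hge : (MG.length : Int) ≤ i := le_of_not_gt hlt
      rw [PySem.List.pyGetD_of_none MG i [] (by rw [PySem.List.pyGet?_eq_none_iff]; simp [PySem.Raise.InRange]; omega)]
      simp [hlt, hge, pvMixed]
  simp only [hcontains, hb]
  rfl

theorem enumerate_shift {α : Type} (xs : List α) (s : Int) :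
    PySem.List.enumerate xs (s + 1) = (PySem.List.enumerate xs s).map (fun p => (p.1 + 1, p.2)) := by
  induction xs generalizing s with
  | nil => simp [PySem.List.enumerate_nil]
  | cons a l ih => simp [PySem.List.enumerate_cons, ih]

theorem pvFilt_nil (xs : List Int) : pvFilt xs [] = xs := by
  unfold pvFilt
  have h : ∀ p ∈ PySem.List.enumerate xs (0 : Int),
      (if decide ((([] : List (List (List Int))).length : Int) ≤ p.1) ||
          pvMixed (PySem.List.pyGetD ([] : List (List (List Int))) p.1 []) then some p.2
       else none) = some p.2 := by
    intro p hp
    obtain ⟨k, hk, rfl⟩ := (PySem.List.mem_enumerate_iff _ _ _).1 hp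
    simp
  rw [List.filterMap_congr h]
  simp [PySem.List.map_snd_enumerate]

theorem pvWalk_eq_pvFilt (xs : List Int) (MG : List (List (List Int))) :
    pvWalk xs MG = pvFilt xs MG := by
  induction xs generalizing MG with
  | nil => cases MG <;> simp [pvWalk, pvFilt, PySem.List.enumerate_nil]
  | cons x l ih =>
    cases MG with
    | nil =>
      rw [pvFilt_nil]
      have : pvWalk l [] = l := by rw [ih, pvFilt_nil]
      simp [pvWalk, this]
    | cons row rows =>
      have hshift : ∀ p ∈ PySem.List.enumerate l (0 : Int),
          (if decide (((row :: rows).length : Int) ≤ p.1 + 1) ||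
              pvMixed (PySem.List.pyGetD (row :: rows) (p.1 + 1) []) then some p.2
           else none) =
          (if decide ((rows.length : Int) ≤ p.1) ||
              pvMixed (PySem.List.pyGetD rows p.1 []) then some p.2
           else none) := by
        intro p hp
        obtain ⟨k, hk, rfl⟩ := (PySem.List.mem_enumerate_iff _ _ _).1 hp
        have hg : PySem.List.pyGetD (row :: rows) ((0 : Int) + k + 1) [] =
            PySem.List.pyGetD rows ((0 : Int) + k) [] := by
          have h1 : ((0 : Int) + k + 1) = ((k + 1 : Nat) : Int) := by omega
          have h2 : ((0 : Int) + k) = ((k : Nat) : Int) := by omega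
          rw [h1, h2, PySem.List.pyGetD_natCast, PySem.List.pyGetD_natCast]
          simp
        have hlen : (decide (((row :: rows).length : Int) ≤ (0 : Int) + k + 1)) =
            (decide ((rows.length : Int) ≤ (0 : Int) + k)) := by
          simp only [List.length_cons]
          congr 1
          simp only [eq_iff_iff]
          push_cast
          omega
        simp only [hg, hlen]
      calc pvWalk (x :: l) (row :: rows)
          = (if pvMixed row then [x] else []) ++ pvFilt l rows := by
            rw [show pvWalk (x :: l) (row :: rows) =
              if pvRowKeeps row then x :: pvWalk l rows else pvWalk l rows from rfl,
              pvRowKeeps_eq_pvMixed, ih]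
            by_cases h : pvMixed row <;> simp [h]
        _ = pvFilt (x :: l) (row :: rows) := by
            unfold pvFilt
            rw [PySem.List.enumerate_cons, List.filterMap_cons, enumerate_shift,
              List.filterMap_map]
            have : (PySem.List.enumerate l (0 : Int)).filterMap
                ((fun p => if decide (((row :: rows).length : Int) ≤ p.1) ||
                    pvMixed (PySem.List.pyGetD (row :: rows) p.1 []) then some p.2 else none) ∘
                  (fun p => (p.1 + 1, p.2))) =
                (PySem.List.enumerate l (0 : Int)).filterMap
                (fun p => if decide ((rows.length : Int) ≤ p.1) ||
                    pvMixed (PySem.List.pyGetD rows p.1 []) then some p.2 else none) :=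
              List.filterMap_congr hshift
            rw [this]
            have hhead : (if decide (((row :: rows).length : Int) ≤ (0 : Int)) ||
                pvMixed (PySem.List.pyGetD (row :: rows) (0 : Int) []) then some x else none) =
                if pvMixed row then some x else none := by
              rw [PySem.List.pyGetD_zero_cons]
              have hf : (decide (((row :: rows).length : Int) ≤ 0)) = false := by
                simp only [decide_eq_false_iff_not, not_le, List.length_cons]
                push_cast; omega
              rw [hf, Bool.false_or]
            rw [hhead]
            by_cases h : pvMixed row <;> simp [h]

-- ===== VERDICT (by name: the statement is the Claim_ definition above) =====
theorem modifycase_spec : Claim_equal_modifycase := by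
  intro src MG _
  unfold Spec_modifycase modifycase_alt
  rw [modifycase_eq_pvFilt, pvWalk_eq_pvFilt]
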